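-- pv_equiv track=rewrite | github.com/ropolexi/deso-notification-posts-stats | notification_check_deso.py | get_most_and_least_engaged_posts
-- ===== SOURCE A (Python) =====
-- def get_most_and_least_engaged_posts(post_scores):
--     post_engagement = {}
--     for post_id, user_scores in post_scores.items():
--         total_engagement = 0
--         for user, scores in user_scores.items():
--             if isinstance(scores, dict):
--                 # Iterate through possible engagement metrics
--                 for metric in ["comment", "diamond", "repost","quote_repost", "LIKE", "LOVE", "DISLIKE", "SAD", "ASTONISHED", "ANGRY", "LAUGH", "POLL"]:
--                     if metric in scores:
--                         total_engagement += scores[metric]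
--         post_engagement[post_id] = total_engagement
--
--     if not post_engagement:
--         return (None, None)
--
--     most_engaged_post = max(post_engagement, key=post_engagement.get)
--     most_engaged_score = post_engagement[most_engaged_post]
--
--
--     return (most_engaged_post,most_engaged_score)
-- ===== SOURCE B (Python) =====
-- METRICS = {"comment", "diamond", "repost", "quote_repost", "LIKE", "LOVE",
--            "DISLIKE", "SAD", "ASTONISHED", "ANGRY", "LAUGH", "POLL"}
--
-- def get_most_and_least_engaged_posts(post_scores):
--     # stage 1: the (post_id, total) table
--     totals = []
--     for post_id, user_scores in post_scores.items():
--         total = 0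
--         for scores in user_scores.values():
--             if isinstance(scores, dict):
--                 total += sum(v for k, v in scores.items() if k in METRICS)
--         totals.append((post_id, total))
--     # stage 2: rank by score; sorted is stable, so among equal scores the
--     # earliest post comes first, matching max's first-wins tie-break
--     ranked = sorted(totals, key=lambda p: p[1], reverse=True)
--     if not ranked:
--         return (None, None)
--     return (ranked[0][0], ranked[0][1])
-- ===== Notes on version B (the rewrite author's own statement) =====
-- stated objective: alternative
-- what changed: B replaces A's per-metric dict probing plus max-with-key over an intermediate engagement dict by a sort-then-pick ranking: it builds a (post, total) table (summing each post's score entries whose key is in the metric set), stably sorts it by score descending, and returns the head; stability makes the head the first-wins maximum.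
import Mathlib
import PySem

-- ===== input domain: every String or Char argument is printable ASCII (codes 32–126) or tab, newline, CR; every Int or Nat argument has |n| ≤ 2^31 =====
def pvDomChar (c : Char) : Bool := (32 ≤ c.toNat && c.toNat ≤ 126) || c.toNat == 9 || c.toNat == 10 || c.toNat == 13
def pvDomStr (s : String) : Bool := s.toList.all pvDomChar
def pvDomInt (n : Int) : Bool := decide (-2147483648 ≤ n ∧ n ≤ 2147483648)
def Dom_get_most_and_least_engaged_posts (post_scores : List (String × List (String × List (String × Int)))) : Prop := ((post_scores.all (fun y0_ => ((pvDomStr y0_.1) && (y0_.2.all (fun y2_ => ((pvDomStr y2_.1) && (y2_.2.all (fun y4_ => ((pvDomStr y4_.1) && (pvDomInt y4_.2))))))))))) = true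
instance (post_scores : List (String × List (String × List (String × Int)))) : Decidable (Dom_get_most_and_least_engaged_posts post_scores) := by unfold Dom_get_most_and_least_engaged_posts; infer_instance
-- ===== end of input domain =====

-- B replaces A's per-metric dict probing and max-with-key over an intermediate engagement dict
-- by a sort-then-pick ranking: build a (post, total) table, stably sort it by score descending,
-- return its head (objective: alternative algorithm; stability gives max's first-wins tie-break).

-- ===== PORT A =====
-- the fixed metric list of A's inner loop
def pvMetricsA : List String :=
  ["comment", "diamond", "repost", "quote_repost", "LIKE", "LOVE", "DISLIKE",
   "SAD", "ASTONISHED", "ANGRY", "LAUGH", "POLL"]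

def get_most_and_least_engaged_posts (post_scores : List (String × List (String × List (String × Int)))) : Option String × Option Int :=
  -- post_engagement = {}; for post_id, user_scores in post_scores.items(): …
  let post_engagement : PySem.Dict String Int :=
    post_scores.foldl (fun d ps =>
      let total_engagement : Int :=
        ps.2.foldl (fun tot us =>
          -- isinstance(scores, dict) is always true under the declared type
          pvMetricsA.foldl (fun t metric =>
            -- if metric in scores: t += scores[metric]
            match (PySem.Dict.mk us.2).get? metric with
            | some v => t + v
            | none   => t) tot) 0
      d.insert ps.1 total_engagement) (PySem.Dict.mk [])
  -- if not post_engagement: return (None, None)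
  if post_engagement.size = 0 then (none, none)
  else
    -- most_engaged_post = max(post_engagement, key=post_engagement.get)
    match PySem.List.max? post_engagement.keys (fun k => post_engagement.getD k 0) with
    | none   => (none, none)  -- unreachable: the dict is nonempty
    | some m => (some m, some (post_engagement.getD m 0))

-- ===== PORT B =====
-- METRICS = {…} (a set of the 12 metric names)
def pvMetricSet : PySem.Set String :=
  PySem.Set.ofList
    ["comment", "diamond", "repost", "quote_repost", "LIKE", "LOVE", "DISLIKE",
     "SAD", "ASTONISHED", "ANGRY", "LAUGH", "POLL"]

def get_most_and_least_engaged_posts_alt (post_scores : List (String × List (String × List (String × Int)))) : Option String × Option Int :=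
  -- totals = []; for post_id, user_scores in post_scores.items(): … totals.append((post_id, total))
  let totals : List (String × Int) :=
    post_scores.foldl (fun acc ps =>
      acc ++ [(ps.1,
        ps.2.foldl (fun tot us =>
          -- isinstance(scores, dict) is always true under the declared type
          -- total += sum(v for k, v in scores.items() if k in METRICS)
          tot + us.2.foldl (fun s kv =>
            if PySem.Set.contains pvMetricSet kv.1 then s + kv.2 else s) 0) 0)]) []
  -- ranked = sorted(totals, key=lambda p: p[1], reverse=True)
  let ranked := PySem.List.sorted totals (fun p => p.2) true
  -- if not ranked: return (None, None);  return (ranked[0][0], ranked[0][1])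
  match ranked with
  | []     => (none, none)
  | p :: _ => (some p.1, some p.2)

-- ===== PRECONDITION & SPEC =====
-- The parameter is a dict of dicts; Pre_ excludes association lists with a duplicate post id or a
-- duplicate key inside an innermost scores dict — duplicate keys cannot occur in a Python dict and
-- are an artefact of the association-list encoding.
def Pre_get_most_and_least_engaged_posts (post_scores : List (String × List (String × List (String × Int)))) : Prop :=
  (post_scores.map Prod.fst).Nodup ∧
  ∀ p ∈ post_scores, ∀ u ∈ p.2, (u.2.map Prod.fst).Nodup
instance (post_scores : List (String × List (String × List (String × Int)))) : Decidable (Pre_get_most_and_least_engaged_posts post_scores) := by unfold Pre_get_most_and_least_engaged_posts; infer_instance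

def pvWitness_get_most_and_least_engaged_posts : (List (String × List (String × List (String × Int)))) :=
  [("p1", [("alice", [("comment", 2), ("LIKE", 1)]), ("bob", [("diamond", 3)])]),
   ("p2", [("alice", [("LAUGH", 1)])])]

def Spec_get_most_and_least_engaged_posts (post_scores : List (String × List (String × List (String × Int)))) (out : Option String × Option Int) : Prop := out = get_most_and_least_engaged_posts_alt post_scores
instance (post_scores : List (String × List (String × List (String × Int)))) (out : Option String × Option Int) : Decidable (Spec_get_most_and_least_engaged_posts post_scores out) := by unfold Spec_get_most_and_least_engaged_posts; infer_instance

-- ===== CLAIM (what is proved, stated in full; the proofs are below) =====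
def Claim_equal_get_most_and_least_engaged_posts : Prop := ∀ (post_scores : List (String × List (String × List (String × Int)))), Dom_get_most_and_least_engaged_posts post_scores → Pre_get_most_and_least_engaged_posts post_scores → Spec_get_most_and_least_engaged_posts post_scores (get_most_and_least_engaged_posts post_scores)

-- ===== LEMMAS AND PROOFS =====

-- A's per-metric contribution for one scores dict
def pvSA (scores : List (String × Int)) : Int :=
  pvMetricsA.foldl (fun t metric =>
    match (PySem.Dict.mk scores).get? metric with
    | some v => t + v
    | none   => t) 0

-- B's per-entry contribution for one scores dict
def pvSB (scores : List (String × Int)) : Int :=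
  scores.foldl (fun s kv => if PySem.Set.contains pvMetricSet kv.1 then s + kv.2 else s) 0

-- a post's total engagement, B-style
def pvTotal (us : List (String × List (String × Int))) : Int :=
  (us.map (fun u => pvSB u.2)).sum

-- the (post id, total) table both programs effectively range over
def pvTs (l : List (String × List (String × List (String × Int)))) : List (String × Int) :=
  l.map (fun ps => (ps.1, pvTotal ps.2))

-- running first-wins argmax over (key, value) pairs
def pvBFold (l : List (String × Int)) (a : Option (String × Int)) : Option (String × Int) :=
  l.foldl (fun a p => match a with
    | none => some p
    | some q => if q.2 < p.2 then some p else some q) a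

theorem pvMetricsA_nodup : pvMetricsA.Nodup := by decide

theorem pvSet_eq : pvMetricSet = pvMetricsA := by decide

theorem pv_mem_metricSet (k : String) :
    PySem.Set.contains pvMetricSet k = decide (k ∈ pvMetricsA) := by
  rw [pvSet_eq]
  simp [PySem.Set.contains]

theorem pvSA_eq_sum (scores : List (String × Int)) :
    pvSA scores = (pvMetricsA.map (fun m => ((PySem.Dict.mk scores).get? m).getD 0)).sum := by
  unfold pvSA
  rw [PySem.List.foldl_congr_mem _ _
        (fun t m => t + ((PySem.Dict.mk scores).get? m).getD 0) _ ?_,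
      PySem.List.foldl_add]
  · simp
  · intro acc m _
    rcases h : (PySem.Dict.mk scores).get? m with _ | v <;> simp [h]

theorem pvSB_eq_sum (scores : List (String × Int)) :
    pvSB scores = (scores.map (fun kv => if PySem.Set.contains pvMetricSet kv.1 then kv.2 else 0)).sum := by
  unfold pvSB
  rw [PySem.List.foldl_congr_mem _ _
        (fun s kv => s + (if PySem.Set.contains pvMetricSet kv.1 then kv.2 else 0)) _ ?_,
      PySem.List.foldl_add]
  · simp
  · intro acc kv _
    by_cases h : PySem.Set.contains pvMetricSet kv.1 = true
    · simp only [if_pos h]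
    · simp only [if_neg h]
      ring

theorem pv_sum_ite_extract (k : String) (v : Int) :
    ∀ (ms : List String), ms.Nodup → ∀ (g : String → Int), g k = 0 →
    (ms.map (fun m => if k = m then v else g m)).sum
      = (if k ∈ ms then v else 0) + (ms.map g).sum := by
  intro ms
  induction ms with
  | nil => simp
  | cons m t ih =>
    intro hnd g hg
    obtain ⟨hmt, hnt⟩ := List.nodup_cons.mp hnd
    by_cases hkm : k = m
    · subst hkm
      have htail : (t.map (fun m => if k = m then v else g m)).sum = (t.map g).sum := by
        congr 1
        apply List.map_congr_left
        intro x hx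
        have : k ≠ x := fun h => hmt (h ▸ hx)
        simp [this]
      simp [htail, hg]
    · have := ih hnt g hg
      by_cases hkt : k ∈ t <;>
        · simp [hkm, hkt, this]
          try ring

theorem pvSA_eq_pvSB (scores : List (String × Int)) (h : (scores.map Prod.fst).Nodup) :
    pvSA scores = pvSB scores := by
  induction scores with
  | nil => rfl
  | cons kv rest ih =>
    simp only [List.map_cons, List.nodup_cons] at h
    obtain ⟨hk, hrest⟩ := h
    rw [pvSA_eq_sum, pvSB_eq_sum]
    have hmap : (pvMetricsA.map (fun m => ((PySem.Dict.mk (kv :: rest)).get? m).getD 0))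
        = pvMetricsA.map (fun m => if kv.1 = m then kv.2 else ((PySem.Dict.mk rest).get? m).getD 0) := by
      apply List.map_congr_left
      intro m _
      rw [PySem.Dict.get?_mk_cons]
      by_cases hm : kv.1 = m <;> simp [hm]
    have hg0 : ((PySem.Dict.mk rest).get? kv.1).getD 0 = 0 := by
      have : (PySem.Dict.mk rest).get? kv.1 = none := by
        rw [PySem.Dict.get?_eq_none_iff_not_mem_keys, PySem.Dict.keys_mk]
        exact hk
      simp [this]
    rw [hmap, pv_sum_ite_extract kv.1 kv.2 pvMetricsA pvMetricsA_nodup _ hg0,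
        ← pvSA_eq_sum, ih hrest, pvSB_eq_sum]
    simp only [List.map_cons, List.sum_cons]
    congr 1
    rw [pv_mem_metricSet]
    by_cases hmem : kv.1 ∈ pvMetricsA <;> simp [hmem]

-- A's metric loop started from any accumulator just adds pvSA
theorem pvInnerShift (scores : List (String × Int)) (acc : Int) :
    pvMetricsA.foldl (fun t metric =>
      match (PySem.Dict.mk scores).get? metric with
      | some v => t + v
      | none   => t) acc = acc + pvSA scores := by
  rw [PySem.List.foldl_congr_mem _ _
        (fun t m => t + ((PySem.Dict.mk scores).get? m).getD 0) _ ?_,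
      PySem.List.foldl_add, pvSA_eq_sum]
  intro t m _
  rcases h : (PySem.Dict.mk scores).get? m with _ | v <;> simp [h]

-- building the engagement dict over fresh keys just appends the (key, total) pairs
theorem pvDictBuild (F : (String × List (String × List (String × Int))) → Int) :
    ∀ (l : List (String × List (String × List (String × Int)))) (d : PySem.Dict String Int),
    (d.keys ++ l.map Prod.fst).Nodup →
    l.foldl (fun d ps => d.insert ps.1 (F ps)) d
      = PySem.Dict.mk (d.items ++ l.map (fun ps => (ps.1, F ps))) := by
  intro l
  induction l with
  | nil => intro d _; simp
  | cons ps t ih =>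
    intro d hnd
    have hfresh : ps.1 ∉ d.keys := by
      intro hmem
      have hmem2 : ps.1 ∈ List.map Prod.fst (ps :: t) := by simp
      exact List.Nodup.disjoint hnd hmem hmem2
    have hcont : d.contains ps.1 = false := by
      rw [PySem.Dict.contains_eq_decide_mem_keys]
      simp [hfresh]
    have hkeys : (d.insert ps.1 (F ps)).keys = d.keys ++ [ps.1] :=
      PySem.Dict.keys_insert_of_not_contains d _ hcont
    have hitems : (d.insert ps.1 (F ps)).items = d.items ++ [(ps.1, F ps)] :=
      PySem.Dict.items_insert_of_not_contains d _ hcont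
    have hnd' : ((d.insert ps.1 (F ps)).keys ++ t.map Prod.fst).Nodup := by
      rw [hkeys, List.append_assoc]
      simpa using hnd
    simp only [List.foldl_cons]
    rw [ih _ hnd', hitems]
    simp

-- the max? fold over the keys mirrors the running-best fold over the pairs
theorem pvMaxFold (look : String → Int) :
    ∀ (l : List (String × Int)), (∀ p ∈ l, look p.1 = p.2) →
    ∀ (a : Option (String × Int)), (∀ q, a = some q → look q.1 = q.2) →
    ((l.map Prod.fst).foldl (fun acc x =>
        match acc with
        | none => some x
        | some m => if look m < look x then some x else some m) (a.map Prod.fst)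
      = (pvBFold l a).map Prod.fst)
    ∧ (∀ q, pvBFold l a = some q → look q.1 = q.2) := by
  intro l
  induction l with
  | nil => intro _ a ha; exact ⟨rfl, by simpa [pvBFold] using ha⟩
  | cons p t ih =>
    intro hl a ha
    have hp : look p.1 = p.2 := hl p (by simp)
    have hlt : ∀ q ∈ t, look q.1 = q.2 := fun q hq => hl q (by simp [hq])
    cases a with
    | none =>
      have := ih hlt (some p) (by intro q hq; obtain rfl : p = q := Option.some.inj hq; exact hp)
      simpa [pvBFold] using this
    | some q =>
      have hq : look q.1 = q.2 := ha q rfl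
      by_cases hcmp : q.2 < p.2
      · have := ih hlt (some p) (by intro r hr; obtain rfl : p = r := Option.some.inj hr; exact hp)
        simpa [pvBFold, hq, hp, hcmp] using this
      · have := ih hlt (some q) (by intro r hr; obtain rfl : q = r := Option.some.inj hr; exact hq)
        simpa [pvBFold, hq, hp, hcmp] using this

theorem pvBFold_some_isSome : ∀ (l : List (String × Int)) (q : String × Int),
    (pvBFold l (some q)).isSome := by
  intro l
  induction l with
  | nil => intro q; rfl
  | cons p t ih =>
    intro q
    simp only [pvBFold, List.foldl_cons]
    by_cases h : q.2 < p.2 <;> simp only [h, if_pos, if_neg, not_false_iff] <;>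
      first
        | simpa [pvBFold] using ih p
        | simpa [pvBFold] using ih q

-- the head of insertBy with the descending "before" test is the strict running-max update
theorem pvHead_insertBy (x : String × Int) (acc : List (String × Int)) :
    (PySem.List.insertBy (fun a b => decide (b.2 < a.2)) x acc).head?
      = (match acc.head? with
         | none   => some x
         | some q => if q.2 < x.2 then some x else some q) := by
  cases acc with
  | nil => rfl
  | cons y t =>
    simp only [PySem.List.insertBy, List.head?_cons]
    by_cases h : y.2 < x.2 <;> simp [h]

-- folding insertBy tracks pvBFold on heads: the head of the descending stable sort is the
-- first-wins argmax
theorem pvHeadFold :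
    ∀ (l acc : List (String × Int)),
    (l.foldl (fun acc x => PySem.List.insertBy (fun a b => decide (b.2 < a.2)) x acc) acc).head?
      = pvBFold l acc.head? := by
  intro l
  induction l with
  | nil => intro acc; rfl
  | cons p t ih =>
    intro acc
    simp only [List.foldl_cons, pvBFold]
    rw [show (t.foldl (fun acc x => PySem.List.insertBy (fun a b => decide (b.2 < a.2)) x acc)
        (PySem.List.insertBy (fun a b => decide (b.2 < a.2)) p acc)).head?
        = pvBFold t (PySem.List.insertBy (fun a b => decide (b.2 < a.2)) p acc).head? from ih _,
      pvHead_insertBy]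
    rfl

-- package an optional best pair as the function's result
def pvO2P (a : Option (String × Int)) : Option String × Option Int :=
  match a with
  | none => (none, none)
  | some q => (some q.1, some q.2)

-- B computes pvO2P of the running argmax over the totals table
theorem pvAltChar (post_scores : List (String × List (String × List (String × Int)))) :
    get_most_and_least_engaged_posts_alt post_scores = pvO2P (pvBFold (pvTs post_scores) none) := by
  unfold get_most_and_least_engaged_posts_alt
  have htotals : post_scores.foldl (fun acc ps =>
      acc ++ [(ps.1,
        ps.2.foldl (fun tot us =>
          tot + us.2.foldl (fun s kv =>
            if PySem.Set.contains pvMetricSet kv.1 then s + kv.2 else s) 0) 0)]) []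
      = pvTs post_scores := by
    rw [PySem.List.foldl_append_singleton_eq_map]
    simp only [List.nil_append]
    apply List.map_congr_left
    intro ps _
    have : ps.2.foldl (fun tot us =>
        tot + us.2.foldl (fun s kv =>
          if PySem.Set.contains pvMetricSet kv.1 then s + kv.2 else s) 0) 0 = pvTotal ps.2 := by
      have hfun : (fun (tot : Int) (us : String × List (String × Int)) =>
          tot + us.2.foldl (fun s kv =>
            if PySem.Set.contains pvMetricSet kv.1 then s + kv.2 else s) 0)
          = fun tot us => tot + pvSB us.2 := rfl
      rw [hfun, PySem.List.foldl_add]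
      simp [pvTotal]
    rw [this]
  rw [htotals]
  show (match PySem.List.sorted (pvTs post_scores) (fun p => p.2) true with
        | [] => ((none : Option String), (none : Option Int))
        | p :: _ => (some p.1, some p.2)) = pvO2P (pvBFold (pvTs post_scores) none)
  have hhead : (PySem.List.sorted (pvTs post_scores) (fun p => p.2) true).head?
      = pvBFold (pvTs post_scores) none := by
    rw [PySem.List.sorted_rev_eq_foldl_insertBy]
    exact pvHeadFold (pvTs post_scores) []
  rcases hs : PySem.List.sorted (pvTs post_scores) (fun p => p.2) true with _ | ⟨p, t⟩
  · rw [hs] at hhead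
    simp only [List.head?_nil] at hhead
    simp [pvO2P, ← hhead]
  · rw [hs] at hhead
    simp only [List.head?_cons] at hhead
    simp [pvO2P, ← hhead]

-- ===== VERDICT (by name: the statement is the Claim_ definition above) =====
theorem get_most_and_least_engaged_posts_spec : Claim_equal_get_most_and_least_engaged_posts := by
  intro post_scores _hdom hpre
  obtain ⟨hnd, hinner⟩ := hpre
  unfold Spec_get_most_and_least_engaged_posts
  rw [pvAltChar]
  unfold get_most_and_least_engaged_posts
  -- the engagement dict is exactly the table pvTs post_scores
  have hdict : post_scores.foldl (fun d ps =>
      d.insert ps.1 (ps.2.foldl (fun tot us =>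
        pvMetricsA.foldl (fun t metric =>
          match (PySem.Dict.mk us.2).get? metric with
          | some v => t + v
          | none   => t) tot) 0)) (PySem.Dict.mk [])
      = PySem.Dict.mk (pvTs post_scores) := by
    rw [pvDictBuild (fun ps => ps.2.foldl (fun tot us =>
        pvMetricsA.foldl (fun t metric =>
          match (PySem.Dict.mk us.2).get? metric with
          | some v => t + v
          | none   => t) tot) 0) post_scores (PySem.Dict.mk [])
        (by simpa using hnd)]
    congr 1
    simp only [List.nil_append]
    apply List.map_congr_left
    intro ps hps
    have hA : ps.2.foldl (fun tot us =>
        pvMetricsA.foldl (fun t metric =>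
          match (PySem.Dict.mk us.2).get? metric with
          | some v => t + v
          | none   => t) tot) 0
        = (ps.2.map (fun us => pvSA us.2)).sum := by
      rw [PySem.List.foldl_congr_mem _ _ (fun tot us => tot + pvSA us.2) _
            (fun acc us _ => pvInnerShift us.2 acc),
          PySem.List.foldl_add]
      simp
    rw [hA]
    unfold pvTotal
    exact congrArg (fun z => (ps.1, z)) (congrArg List.sum
      (List.map_congr_left fun us hus => pvSA_eq_pvSB us.2 (hinner ps hps us hus)))
  rw [hdict]
  by_cases hemp : (PySem.Dict.mk (pvTs post_scores)).size = 0
  · have h0 : pvTs post_scores = [] := by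
      simpa [PySem.Dict.size] using hemp
    rw [if_pos hemp, h0]
    rfl
  · rw [if_neg hemp]
    have hts : pvTs post_scores ≠ [] := by
      intro h
      exact hemp (by simp [PySem.Dict.size, h])
    have hkeysnd : (PySem.Dict.mk (pvTs post_scores)).keys.Nodup := by
      rw [PySem.Dict.keys_mk]
      simpa [pvTs, List.map_map, Function.comp] using hnd
    have hlook : ∀ p ∈ pvTs post_scores,
        (PySem.Dict.mk (pvTs post_scores)).getD p.1 0 = p.2 := fun p hp =>
      PySem.Dict.getD_of_mem_items _ hp hkeysnd 0
    obtain ⟨hmax, hsound⟩ := pvMaxFold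
      (fun k => (PySem.Dict.mk (pvTs post_scores)).getD k 0)
      (pvTs post_scores) hlook none (by intro q h; cases h)
    have hmaxeq : PySem.List.max? (PySem.Dict.mk (pvTs post_scores)).keys
        (fun k => (PySem.Dict.mk (pvTs post_scores)).getD k 0)
        = (pvBFold (pvTs post_scores) none).map Prod.fst := by
      have hfst : (fun (x : String × Int) => x.1) = Prod.fst := rfl
      rw [PySem.Dict.keys_mk, hfst]
      unfold PySem.List.max?
      rw [show (Option.map (Prod.fst (α := String) (β := Int)) none) = none from rfl] at hmax
      convert hmax using 2
      funext acc x
      cases acc <;> rfl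
    obtain ⟨p, t, hpt⟩ := List.exists_cons_of_ne_nil hts
    have hsome : (pvBFold (pvTs post_scores) none).isSome := by
      rw [hpt]
      show (pvBFold t (some p)).isSome
      exact pvBFold_some_isSome t p
    obtain ⟨q, hq⟩ := Option.isSome_iff_exists.mp hsome
    rw [hmaxeq, hq, Option.map_some]
    have hs : (PySem.Dict.mk (pvTs post_scores)).getD q.1 0 = q.2 := hsound q hq
    simp only [hs]
    rfl
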